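-- pv_equiv track=rewrite | github.com/HananMurrar/Sawt | Sawt/backFolder/videoSubsystem.py | group_timestamps
-- ===== SOURCE A (Python) =====
-- def group_timestamps(timestamps, max_gap=3000):
--     segments = []
--     timestamps.sort()
--     if not timestamps:
--         return segments
--     start = timestamps[0]
--     for i in range(1, len(timestamps)):
--         if timestamps[i] - timestamps[i - 1] > max_gap:
--             segments.append((start, timestamps[i - 1]))
--             start = timestamps[i]
--     segments.append((start, timestamps[-1]))
--     return segments
-- ===== SOURCE B (Python) =====
-- def group_timestamps(timestamps, max_gap=3000):
--     timestamps.sort()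
--     if not timestamps:
--         return []
--
--     def rec(lo, hi):
--         # segments of timestamps[lo:hi], lo < hi
--         if hi - lo == 1:
--             return [(timestamps[lo], timestamps[lo])]
--         mid = (lo + hi) // 2
--         left = rec(lo, mid)
--         right = rec(mid, hi)
--         if timestamps[mid] - timestamps[mid - 1] > max_gap:
--             return left + right
--         ls = left[-1][0]
--         re = right[0][1]
--         return left[:-1] + [(ls, re)] + right[1:]
--
--     return rec(0, len(timestamps))
-- ===== Notes on version B (the rewrite author's own statement) =====
-- stated objective: alternative
-- what changed: Replaces A's left-to-right scan with a running start by a divide-and-conquer: recursively compute the segments of each half of the sorted list and merge at the junction (concatenate if the junction gap exceeds max_gap, otherwise fuse the last left segment with the first right segment).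
import Mathlib
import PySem

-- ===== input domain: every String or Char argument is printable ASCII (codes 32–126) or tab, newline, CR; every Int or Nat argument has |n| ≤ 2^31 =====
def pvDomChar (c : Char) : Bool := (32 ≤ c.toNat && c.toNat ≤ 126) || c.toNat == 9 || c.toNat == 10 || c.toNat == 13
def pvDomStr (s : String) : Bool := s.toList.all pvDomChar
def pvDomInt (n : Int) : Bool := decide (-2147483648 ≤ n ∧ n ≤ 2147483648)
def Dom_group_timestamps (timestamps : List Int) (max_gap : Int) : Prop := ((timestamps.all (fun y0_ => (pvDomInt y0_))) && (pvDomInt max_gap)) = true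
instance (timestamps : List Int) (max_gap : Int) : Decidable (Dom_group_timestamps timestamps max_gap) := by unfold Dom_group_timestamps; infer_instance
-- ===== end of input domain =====

-- B replaces A's left-to-right scan (running start, append at each large gap) by a
-- divide-and-conquer on index ranges that merges the two halves' segment lists at the
-- junction (objective: alternative algorithm, same cost). Both Pythons sort the argument
-- in place; the equivalence proved here is about the RETURN value (the mutation is identical).

-- ===== PORT A =====
-- A's for-loop over range(1, len(ts)) carrying (segments, start); indices are always in
-- range, so ts.getD i 0 is exact for ts[i].
def group_timestamps (timestamps : List Int) (max_gap : Int) : List (Int × Int) :=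
  let ts := PySem.List.sorted timestamps (fun x => x) false
  if ts = [] then []
  else
    let start0 := ts.getD 0 0
    let st := (List.range' 1 (ts.length - 1)).foldl
      (fun (p : List (Int × Int) × Int) i =>
        if ts.getD i 0 - ts.getD (i - 1) 0 > max_gap then
          (p.1 ++ [(p.2, ts.getD (i - 1) 0)], ts.getD i 0)
        else p)
      ([], start0)
    st.1 ++ [(st.2, ts.getD (ts.length - 1) 0)]

-- ===== PORT B =====
-- Source B's inner rec(lo, hi): segments of ts[lo:hi]. rec is only ever called with lo < hi,
-- where its base test 'hi - lo == 1' coincides with 'hi ≤ lo + 1' used here for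
-- termination; left/right are always nonempty, so getLastD/headD defaults are exact for
-- left[-1]/right[0], and dropLast/tail are exact for left[:-1]/right[1:].
def pvRec (ts : List Int) (g : Int) (lo hi : Nat) : List (Int × Int) :=
  if hi ≤ lo + 1 then [(ts.getD lo 0, ts.getD lo 0)]
  else
    let mid := (lo + hi) / 2
    let left := pvRec ts g lo mid
    let right := pvRec ts g mid hi
    if ts.getD mid 0 - ts.getD (mid - 1) 0 > g then left ++ right
    else
      let ls := (left.getLastD (0, 0)).1
      let re := (right.headD (0, 0)).2
      left.dropLast ++ [(ls, re)] ++ right.tail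
termination_by hi - lo
decreasing_by all_goals omega

def group_timestamps_alt (timestamps : List Int) (max_gap : Int) : List (Int × Int) :=
  let ts := PySem.List.sorted timestamps (fun x => x) false
  if ts = [] then []
  else pvRec ts max_gap 0 ts.length

-- ===== PRECONDITION & SPEC =====
def Spec_group_timestamps (timestamps : List Int) (max_gap : Int) (out : List (Int × Int)) : Prop := out = group_timestamps_alt timestamps max_gap
instance (timestamps : List Int) (max_gap : Int) (out : List (Int × Int)) : Decidable (Spec_group_timestamps timestamps max_gap out) := by unfold Spec_group_timestamps; infer_instance

-- ===== CLAIM (what is proved, stated in full; the proofs are below) =====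
def Claim_equal_group_timestamps : Prop := ∀ (timestamps : List Int) (max_gap : Int), Dom_group_timestamps timestamps max_gap → Spec_group_timestamps timestamps max_gap (group_timestamps timestamps max_gap)

-- ===== LEMMAS AND PROOFS =====

-- adjacent pairs of a boundary list, mapped through ts: the common characterisation both
-- ports are reduced to
def pvPairs (ts : List Int) : List Nat → List (Int × Int)
  | b :: e :: rest => (ts.getD b 0, ts.getD (e - 1) 0) :: pvPairs ts (e :: rest)
  | _ => []

lemma pvPairs_append_last (ts : List Int) (b : Nat) (rest : List Nat) (e : Nat) :
    pvPairs ts ((b :: rest) ++ [e])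
      = pvPairs ts (b :: rest) ++ [(ts.getD ((b :: rest).getLastD 0) 0, ts.getD (e - 1) 0)] := by
  match rest with
  | [] => rfl
  | c :: rest' =>
    have := pvPairs_append_last ts c rest' e
    simp only [List.cons_append, pvPairs] at this ⊢
    rw [this]
    simp

lemma pvPairs_split (ts : List Int) (b m : Nat) (xs ys : List Nat) :
    pvPairs ts (b :: (xs ++ m :: ys)) = pvPairs ts (b :: (xs ++ [m])) ++ pvPairs ts (m :: ys) := by
  induction xs generalizing b with
  | nil => cases ys <;> simp [pvPairs]
  | cons c xs ih =>
    simp only [List.cons_append, pvPairs, ih c]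

-- loop invariant for A: after folding indices [1, 1+k), A's state is (pairs of the
-- boundary prefix, ts[last boundary]), the boundary prefix being 0 :: filter over [1, 1+k)
lemma pvInvariant (ts : List Int) (g : Int) (k : Nat) :
    ((List.range' 1 k).foldl
      (fun (p : List (Int × Int) × Int) i =>
        if ts.getD i 0 - ts.getD (i - 1) 0 > g then
          (p.1 ++ [(p.2, ts.getD (i - 1) 0)], ts.getD i 0)
        else p)
      ([], ts.getD 0 0))
    = (pvPairs ts (0 :: (List.range' 1 k).filter (fun i => ts.getD i 0 - ts.getD (i - 1) 0 > g)),
       ts.getD ((0 :: (List.range' 1 k).filter (fun i => ts.getD i 0 - ts.getD (i - 1) 0 > g)).getLastD 0) 0) := by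
  induction k with
  | zero => rfl
  | succ k ih =>
    rw [List.range'_concat, List.foldl_append, ih, List.filter_append]
    simp only [Nat.one_mul]
    by_cases h : ts.getD (1 + k) 0 - ts.getD (1 + k - 1) 0 > g
    · simp only [List.foldl_cons, List.foldl_nil, List.filter_cons, List.filter_nil,
        decide_eq_true_eq, if_pos h]
      rw [← List.cons_append, pvPairs_append_last]
      refine Prod.ext rfl ?_
      rw [List.getLastD_concat]
    · simp only [List.foldl_cons, List.foldl_nil, List.filter_cons, List.filter_nil,
        decide_eq_true_eq, if_neg h, List.append_nil]

-- B's recursion computes the pairs of the boundary list of its index range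
lemma pvRec_eq (ts : List Int) (g : Int) (n : Nat) : ∀ lo hi, hi - lo = n → lo < hi →
    pvRec ts g lo hi
      = pvPairs ts (lo :: ((List.range' (lo + 1) (hi - lo - 1)).filter
          (fun i => ts.getD i 0 - ts.getD (i - 1) 0 > g) ++ [hi])) := by
  induction n using Nat.strong_induction_on with
  | _ n ih =>
    intro lo hi hn hlt
    rw [pvRec]
    by_cases hb : hi ≤ lo + 1
    · have he : hi = lo + 1 := by omega
      subst he
      simp [pvPairs]
    · simp only [if_neg hb]
      have hmid1 : lo < (lo + hi) / 2 := by omega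
      have hmid2 : (lo + hi) / 2 < hi := by omega
      rw [ih ((lo + hi) / 2 - lo) (by omega) lo ((lo + hi) / 2) rfl hmid1,
          ih (hi - (lo + hi) / 2) (by omega) ((lo + hi) / 2) hi rfl hmid2]
      have hsplit : List.range' (lo + 1) (hi - lo - 1)
          = List.range' (lo + 1) ((lo + hi) / 2 - lo - 1)
            ++ ((lo + hi) / 2 :: List.range' ((lo + hi) / 2 + 1) (hi - (lo + hi) / 2 - 1)) := by
        rw [show hi - lo - 1 = ((lo + hi) / 2 - lo - 1) + ((hi - (lo + hi) / 2 - 1) + 1) by omega,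
            ← List.range'_append_1, show lo + 1 + ((lo + hi) / 2 - lo - 1) = (lo + hi) / 2 by omega,
            List.range'_succ]
      rw [hsplit, List.filter_append, List.filter_cons]
      set f1 := (List.range' (lo + 1) ((lo + hi) / 2 - lo - 1)).filter
        (fun i => ts.getD i 0 - ts.getD (i - 1) 0 > g) with hf1
      set f2 := (List.range' ((lo + hi) / 2 + 1) (hi - (lo + hi) / 2 - 1)).filter
        (fun i => ts.getD i 0 - ts.getD (i - 1) 0 > g) with hf2
      set q := ts.getD ((lo :: f1).getLastD 0) 0 with hq
      by_cases hc : ts.getD ((lo + hi) / 2) 0 - ts.getD ((lo + hi) / 2 - 1) 0 > g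
      · simp only [decide_eq_true_eq, if_pos hc]
        rw [show f1 ++ (lo + hi) / 2 :: f2 ++ [hi] = f1 ++ ((lo + hi) / 2 :: (f2 ++ [hi])) by simp,
            pvPairs_split ts lo ((lo + hi) / 2) f1 (f2 ++ [hi])]
      · simp only [decide_eq_true_eq, if_neg hc]
        have A : pvPairs ts (lo :: (f1 ++ [(lo + hi) / 2]))
            = pvPairs ts (lo :: f1) ++ [(q, ts.getD ((lo + hi) / 2 - 1) 0)] :=
          pvPairs_append_last ts lo f1 ((lo + hi) / 2)
        rw [A]
        match hf2e : f2 with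
        | [] =>
          have C : pvPairs ts (lo :: (f1 ++ ([] : List Nat) ++ [hi]))
              = pvPairs ts (lo :: f1) ++ [(q, ts.getD (hi - 1) 0)] := by
            simpa using pvPairs_append_last ts lo f1 hi
          rw [C]
          simp [pvPairs]
        | c :: rest =>
          have C : pvPairs ts ((lo + hi) / 2 :: ((c :: rest) ++ [hi]))
              = (ts.getD ((lo + hi) / 2) 0, ts.getD (c - 1) 0) :: pvPairs ts (c :: (rest ++ [hi])) := rfl
          have D : pvPairs ts (lo :: (f1 ++ (c :: rest) ++ [hi]))
              = pvPairs ts (lo :: f1) ++ [(q, ts.getD (c - 1) 0)] ++ pvPairs ts (c :: (rest ++ [hi])) := by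
            have A2 : pvPairs ts (lo :: (f1 ++ [c]))
                = pvPairs ts (lo :: f1) ++ [(q, ts.getD (c - 1) 0)] :=
              pvPairs_append_last ts lo f1 c
            rw [show f1 ++ (c :: rest) ++ [hi] = f1 ++ (c :: (rest ++ [hi])) by simp,
                pvPairs_split ts lo c f1 (rest ++ [hi]), A2]
          rw [C, D]
          simp

-- ===== VERDICT (by name: the statement is the Claim_ definition above) =====
theorem group_timestamps_spec : Claim_equal_group_timestamps := by
  intro timestamps max_gap _
  unfold Spec_group_timestamps group_timestamps group_timestamps_alt
  set ts := PySem.List.sorted timestamps (fun x => x) false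
  by_cases h : ts = []
  · simp [h]
  · simp only [if_neg h]
    have hlen : 0 < ts.length := List.length_pos_iff.mpr h
    rw [pvRec_eq ts max_gap ts.length 0 ts.length rfl hlen, pvInvariant,
        ← List.cons_append, pvPairs_append_last]
    congr 2
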